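-- pv_equiv track=rewrite | github.com/aliceq13/KABS_paper | compare_model_frames.py | find_candidate_frames
-- ===== SOURCE A (Python) =====
-- from typing import Dict, List, Set, Tuple
--
-- def find_candidate_frames(model_frames: Dict[str, List[int]], gt_frames: List[int]) -> List[int]:
--     """Find frames selected by models but not in GT."""
--     gt_set = set(gt_frames)
--
--     candidates = set()
--     for frames in model_frames.values():
--         for frame in frames:
--             if frame not in gt_set:
--                 candidates.add(frame)
--
--     return sorted(candidates)
-- ===== SOURCE B (Python) =====
-- def find_candidate_frames(model_frames, gt_frames):
--     """Find frames selected by models but not in GT, by merging two sorted lists."""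
--     pool = sorted(f for fs in model_frames.values() for f in fs)
--     gt = sorted(gt_frames)
--     out = []
--     i = j = 0
--     while i < len(pool):
--         p = pool[i]
--         if j < len(gt) and gt[j] < p:
--             j += 1
--         elif j < len(gt) and gt[j] == p:
--             i += 1
--         elif out and out[-1] == p:
--             i += 1
--         else:
--             out.append(p)
--             i += 1
--     return out
-- ===== Notes on version B (the rewrite author's own statement) =====
-- stated objective: alternative
-- what changed: Replaces the hash-set collect-and-filter (build gt set, nested membership-test loops, sort at the end) with a sort-then-merge algorithm: sort all model frames and the ground truth once, then a two-pointer merge scan emits the strictly increasing difference, deduplicating against the last emitted element; no set structure at all.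
import Mathlib
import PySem

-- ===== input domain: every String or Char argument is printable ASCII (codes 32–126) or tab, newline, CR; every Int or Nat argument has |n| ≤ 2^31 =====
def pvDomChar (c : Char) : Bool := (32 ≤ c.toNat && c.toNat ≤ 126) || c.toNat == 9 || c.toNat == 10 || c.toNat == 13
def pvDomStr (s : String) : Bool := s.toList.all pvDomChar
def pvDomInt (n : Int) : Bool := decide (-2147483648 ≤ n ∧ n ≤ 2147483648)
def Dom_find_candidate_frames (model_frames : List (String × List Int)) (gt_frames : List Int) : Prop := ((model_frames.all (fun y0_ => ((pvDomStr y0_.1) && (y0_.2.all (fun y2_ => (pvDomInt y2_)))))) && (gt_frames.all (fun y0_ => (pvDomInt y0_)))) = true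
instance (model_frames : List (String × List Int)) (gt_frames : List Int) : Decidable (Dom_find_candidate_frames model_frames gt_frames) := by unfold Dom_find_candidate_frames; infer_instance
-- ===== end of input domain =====

-- B replaces A's hash-set collect-and-filter with sort-then-merge: sort all model
-- frames and the ground truth, then a two-pointer merge scan emits the strictly
-- increasing difference; objective: alternative algorithm (no set structure).


-- ===== PORT A =====
-- literal transliteration: gt_set = set(gt_frames); nested loop over values adding
-- each frame not in gt_set to a set; return sorted(candidates)
def find_candidate_frames (model_frames : List (String × List Int)) (gt_frames : List Int) : List Int :=
  let gt_set : PySem.Set Int := PySem.Set.ofList gt_frames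
  let candidates : PySem.Set Int :=
    model_frames.foldl (fun c p =>
      p.2.foldl (fun c frame =>
        if PySem.Set.contains gt_set frame then c else PySem.Set.add c frame) c)
      PySem.Set.empty
  PySem.List.sorted candidates (fun x => x) false

-- ===== PORT B =====
-- Source B's while loop over indices i (into pool) and j (into gt), transcribed as
-- structural recursion on the two list suffixes; `out and out[-1] == p` is the
-- getLast? test, `out.append(p)` is `out ++ [p]`.
def fcfMerge : List Int → List Int → List Int → List Int
  | out, [], _ => out
  | out, p :: ps, g :: gs =>
      if g < p then fcfMerge out (p :: ps) gs
      else if g = p then fcfMerge out ps (g :: gs)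
      else if out.getLast? = some p then fcfMerge out ps (g :: gs)
      else fcfMerge (out ++ [p]) ps (g :: gs)
  | out, p :: ps, [] =>
      if out.getLast? = some p then fcfMerge out ps []
      else fcfMerge (out ++ [p]) ps []
termination_by out pool gt => pool.length + gt.length

-- literal transliteration of Source B: pool = sorted(all model frames), gt = sorted(gt_frames),
-- then the merge loop above starting from out = [], i = j = 0.
def find_candidate_frames_alt (model_frames : List (String × List Int)) (gt_frames : List Int) : List Int :=
  let pool := PySem.List.sorted (model_frames.flatMap (fun p => p.2)) (fun x => x) false
  let gts := PySem.List.sorted gt_frames (fun x => x) false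
  fcfMerge [] pool gts

-- ===== PRECONDITION & SPEC =====
def Spec_find_candidate_frames (model_frames : List (String × List Int)) (gt_frames : List Int) (out : List Int) : Prop := out = find_candidate_frames_alt model_frames gt_frames
instance (model_frames : List (String × List Int)) (gt_frames : List Int) (out : List Int) : Decidable (Spec_find_candidate_frames model_frames gt_frames out) := by unfold Spec_find_candidate_frames; infer_instance

-- ===== CLAIM (what is proved, stated in full; the proofs are below) =====
def Claim_equal_find_candidate_frames : Prop := ∀ (model_frames : List (String × List Int)) (gt_frames : List Int), Dom_find_candidate_frames model_frames gt_frames → Spec_find_candidate_frames model_frames gt_frames (find_candidate_frames model_frames gt_frames)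

-- ===== LEMMAS AND PROOFS =====

-- A's inner loop: membership characterisation
theorem mem_inner (gt_set : PySem.Set Int) (frames : List Int) (c : PySem.Set Int) (y : Int) :
    (y ∈ frames.foldl (fun c frame =>
        if PySem.Set.contains gt_set frame then c else PySem.Set.add c frame) c)
      ↔ y ∈ c ∨ (y ∈ frames ∧ y ∉ gt_set) := by
  induction frames generalizing c with
  | nil => simp
  | cons f fs ih =>
    simp only [List.foldl_cons, ih, List.mem_cons]
    by_cases h : f ∈ gt_set
    · rw [if_pos (by simpa using h)]
      constructor
      · tauto
      · rintro (hc | ⟨rfl | hm, hn⟩) <;> tauto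
    · rw [if_neg (by simpa using h)]
      simp only [PySem.Set.mem_add]
      constructor
      · rintro ((hc | rfl) | ⟨hm, hn⟩) <;> tauto
      · rintro (hc | ⟨rfl | hm, hn⟩) <;> tauto

-- A's inner loop preserves Nodup
theorem nodup_inner (gt_set : PySem.Set Int) (frames : List Int) (c : PySem.Set Int)
    (hc : c.Nodup) :
    (frames.foldl (fun c frame =>
        if PySem.Set.contains gt_set frame then c else PySem.Set.add c frame) c).Nodup := by
  induction frames generalizing c with
  | nil => simpa
  | cons f fs ih =>
    simp only [List.foldl_cons]
    split
    · exact ih c hc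
    · exact ih _ (PySem.Set.nodup_add c f hc)

-- A's outer loop: membership characterisation
theorem mem_outer (gt_set : PySem.Set Int) (mf : List (String × List Int)) (c : PySem.Set Int) (y : Int) :
    (y ∈ mf.foldl (fun c p =>
        p.2.foldl (fun c frame =>
          if PySem.Set.contains gt_set frame then c else PySem.Set.add c frame) c) c)
      ↔ y ∈ c ∨ ((∃ p ∈ mf, y ∈ p.2) ∧ y ∉ gt_set) := by
  induction mf generalizing c with
  | nil => simp
  | cons p ps ih =>
    simp only [List.foldl_cons, ih, mem_inner]
    constructor
    · rintro ((hc | ⟨hm, hn⟩) | ⟨⟨q, hq, hm⟩, hn⟩)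
      · tauto
      · exact Or.inr ⟨⟨p, by simp, hm⟩, hn⟩
      · exact Or.inr ⟨⟨q, by simp [hq], hm⟩, hn⟩
    · rintro (hc | ⟨⟨q, hq, hm⟩, hn⟩)
      · tauto
      · rcases List.mem_cons.mp hq with rfl | hq
        · exact Or.inl (Or.inr ⟨hm, hn⟩)
        · exact Or.inr ⟨⟨q, hq, hm⟩, hn⟩

-- A's outer loop preserves Nodup
theorem nodup_outer (gt_set : PySem.Set Int) (mf : List (String × List Int)) (c : PySem.Set Int)
    (hc : c.Nodup) :
    (mf.foldl (fun c p =>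
        p.2.foldl (fun c frame =>
          if PySem.Set.contains gt_set frame then c else PySem.Set.add c frame) c) c).Nodup := by
  induction mf generalizing c with
  | nil => simpa
  | cons p ps ih => exact ih _ (nodup_inner gt_set p.2 c hc)

-- In a strictly increasing list, an element that bounds the whole list is its last element.
theorem getLast?_of_max (l : List Int) (h : l.Pairwise (· < ·)) (y : Int)
    (hy : y ∈ l) (hmax : ∀ z ∈ l, z ≤ y) : l.getLast? = some y := by
  induction l with
  | nil => cases hy
  | cons a t ih =>
    cases t with
    | nil =>
      rcases List.mem_singleton.mp hy with rfl
      rfl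
    | cons b u =>
      rw [List.getLast?_cons_cons]
      rcases List.mem_cons.mp hy with rfl | hyt
      · exfalso
        have hab : y < b := (List.pairwise_cons.mp h).1 b (by simp)
        have := hmax b (by simp)
        omega
      · exact ih (List.pairwise_cons.mp h).2 hyt fun z hz => hmax z (List.mem_cons_of_mem _ hz)

-- Invariant of B's merge loop: with `pool` and `gt` weakly sorted, `out` strictly
-- sorted and every element of `out` ≤ every element of `pool`, the result is
-- strictly sorted and its members are exactly out ∪ (pool \ gt).
theorem fcfMerge_spec (out pool gt : List Int) :
    pool.Pairwise (· ≤ ·) → gt.Pairwise (· ≤ ·) → out.Pairwise (· < ·) →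
    (∀ y ∈ out, ∀ x ∈ pool, y ≤ x) →
    (fcfMerge out pool gt).Pairwise (· < ·) ∧
    (∀ y, y ∈ fcfMerge out pool gt ↔ y ∈ out ∨ (y ∈ pool ∧ y ∉ gt)) := by
  induction out, pool, gt using fcfMerge.induct with
  | case1 out gt =>
    intro _ _ hout _
    simp [fcfMerge, hout]
  | case2 out p ps g gs hlt ih =>
    intro hpool hgt hout hle
    rw [show fcfMerge out (p :: ps) (g :: gs) = fcfMerge out (p :: ps) gs by
      simp [fcfMerge, hlt]]
    obtain ⟨hPW, hMem⟩ := ih hpool (List.pairwise_cons.mp hgt).2 hout hle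
    refine ⟨hPW, fun y => ?_⟩
    rw [hMem]
    have hgy : ∀ y ∈ p :: ps, y ≠ g := by
      intro y hy
      have : p ≤ y := by
        rcases List.mem_cons.mp hy with rfl | hy
        · exact le_refl _
        · exact (List.pairwise_cons.mp hpool).1 y hy
      omega
    constructor
    · rintro (h | ⟨hm, hn⟩)
      · tauto
      · exact Or.inr ⟨hm, by simp [hn, hgy y hm]⟩
    · rintro (h | ⟨hm, hn⟩)
      · tauto
      · exact Or.inr ⟨hm, fun h' => hn (List.mem_cons_of_mem _ h')⟩
  | case3 out ps g gs hlt ih =>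
    intro hpool hgt hout hle
    rw [show fcfMerge out (g :: ps) (g :: gs) = fcfMerge out ps (g :: gs) by
      simp [fcfMerge]]
    obtain ⟨hPW, hMem⟩ := ih (List.pairwise_cons.mp hpool).2 hgt hout
      (fun y hy x hx => hle y hy x (List.mem_cons_of_mem _ hx))
    refine ⟨hPW, fun y => ?_⟩
    rw [hMem]
    constructor
    · rintro (h | ⟨hm, hn⟩)
      · tauto
      · exact Or.inr ⟨List.mem_cons_of_mem _ hm, hn⟩
    · rintro (h | ⟨hm, hn⟩)
      · tauto
      · rcases List.mem_cons.mp hm with rfl | hm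
        · exact absurd (by simp : y ∈ y :: gs) hn
        · exact Or.inr ⟨hm, hn⟩
  | case4 out p ps g gs hlt heq hlast ih =>
    intro hpool hgt hout hle
    rw [show fcfMerge out (p :: ps) (g :: gs) = fcfMerge out ps (g :: gs) by
      simp only [fcfMerge]; rw [if_neg hlt, if_neg heq, if_pos hlast]]
    obtain ⟨hPW, hMem⟩ := ih (List.pairwise_cons.mp hpool).2 hgt hout
      (fun y hy x hx => hle y hy x (List.mem_cons_of_mem _ hx))
    have hpmem : p ∈ out := List.mem_of_mem_getLast? (by simp [hlast])
    refine ⟨hPW, fun y => ?_⟩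
    rw [hMem]
    constructor
    · rintro (h | ⟨hm, hn⟩)
      · tauto
      · exact Or.inr ⟨List.mem_cons_of_mem _ hm, hn⟩
    · rintro (h | ⟨hm, hn⟩)
      · tauto
      · rcases List.mem_cons.mp hm with rfl | hm
        · exact Or.inl hpmem
        · exact Or.inr ⟨hm, hn⟩
  | case5 out p ps g gs hlt heq hlast ih =>
    intro hpool hgt hout hle
    rw [show fcfMerge out (p :: ps) (g :: gs) = fcfMerge (out ++ [p]) ps (g :: gs) by
      simp only [fcfMerge]; rw [if_neg hlt, if_neg heq, if_neg hlast]]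
    have hltout : ∀ y ∈ out, y < p := by
      intro y hy
      have hyp : y ≤ p := hle y hy p (by simp)
      rcases lt_or_eq_of_le hyp with h | rfl
      · exact h
      · exact absurd (getLast?_of_max out hout y hy fun z hz => hle z hz y (by simp)) hlast
    have hout' : (out ++ [p]).Pairwise (· < ·) := by
      rw [List.pairwise_append]
      exact ⟨hout, by simp, by simpa using hltout⟩
    have hle' : ∀ y ∈ out ++ [p], ∀ x ∈ ps, y ≤ x := by
      intro y hy x hx
      rcases List.mem_append.mp hy with hy | hy
      · exact hle y hy x (List.mem_cons_of_mem _ hx)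
      · rcases List.mem_singleton.mp hy with rfl
        exact (List.pairwise_cons.mp hpool).1 x hx
    obtain ⟨hPW, hMem⟩ := ih (List.pairwise_cons.mp hpool).2 hgt hout' hle'
    have hpnot : p ∉ g :: gs := by
      intro h
      rcases List.mem_cons.mp h with rfl | h
      · exact heq rfl
      · have := (List.pairwise_cons.mp hgt).1 p h
        omega
    refine ⟨hPW, fun y => ?_⟩
    rw [hMem]
    simp only [List.mem_append, List.mem_cons, List.not_mem_nil, or_false]
    constructor
    · rintro ((h | rfl) | ⟨hm, hn⟩)
      · refine Or.inl h
      · exact Or.inr ⟨Or.inl rfl, fun hc => hpnot (by simpa using hc)⟩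
      · exact Or.inr ⟨Or.inr hm, hn⟩
    · rintro (h | ⟨rfl | hm, hn⟩)
      · exact Or.inl (Or.inl h)
      · exact Or.inl (Or.inr rfl)
      · exact Or.inr ⟨hm, hn⟩
  | case6 out p ps hlast ih =>
    intro hpool _ hout hle
    rw [show fcfMerge out (p :: ps) [] = fcfMerge out ps [] by
      simp only [fcfMerge]; rw [if_pos hlast]]
    obtain ⟨hPW, hMem⟩ := ih (List.pairwise_cons.mp hpool).2 (by simp) hout
      (fun y hy x hx => hle y hy x (List.mem_cons_of_mem _ hx))
    have hpmem : p ∈ out := List.mem_of_mem_getLast? (by simp [hlast])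
    refine ⟨hPW, fun y => ?_⟩
    rw [hMem]
    constructor
    · rintro (h | ⟨hm, hn⟩)
      · tauto
      · exact Or.inr ⟨List.mem_cons_of_mem _ hm, hn⟩
    · rintro (h | ⟨hm, hn⟩)
      · tauto
      · rcases List.mem_cons.mp hm with rfl | hm
        · exact Or.inl hpmem
        · exact Or.inr ⟨hm, hn⟩
  | case7 out p ps hlast ih =>
    intro hpool _ hout hle
    rw [show fcfMerge out (p :: ps) [] = fcfMerge (out ++ [p]) ps [] by
      simp only [fcfMerge]; rw [if_neg hlast]]
    have hltout : ∀ y ∈ out, y < p := by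
      intro y hy
      have hyp : y ≤ p := hle y hy p (by simp)
      rcases lt_or_eq_of_le hyp with h | rfl
      · exact h
      · exact absurd (getLast?_of_max out hout y hy fun z hz => hle z hz y (by simp)) hlast
    have hout' : (out ++ [p]).Pairwise (· < ·) := by
      rw [List.pairwise_append]
      exact ⟨hout, by simp, by simpa using hltout⟩
    have hle' : ∀ y ∈ out ++ [p], ∀ x ∈ ps, y ≤ x := by
      intro y hy x hx
      rcases List.mem_append.mp hy with hy | hy
      · exact hle y hy x (List.mem_cons_of_mem _ hx)
      · rcases List.mem_singleton.mp hy with rfl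
        exact (List.pairwise_cons.mp hpool).1 x hx
    obtain ⟨hPW, hMem⟩ := ih (List.pairwise_cons.mp hpool).2 (by simp) hout' hle'
    refine ⟨hPW, fun y => ?_⟩
    rw [hMem]
    simp only [List.mem_append, List.mem_cons, List.not_mem_nil, or_false,
      not_false_iff, and_true]
    tauto

-- ===== VERDICT (by name: the statement is the Claim_ definition above) =====
theorem find_candidate_frames_spec : Claim_equal_find_candidate_frames := by
  intro mf gt _
  unfold Spec_find_candidate_frames find_candidate_frames find_candidate_frames_alt
  have hpool : (PySem.List.sorted (mf.flatMap (fun p => p.2)) (fun x => x) false).Pairwise (· ≤ ·) := by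
    simpa using PySem.List.sorted_pairwise (mf.flatMap (fun p => p.2)) (fun x => x)
  have hgts : (PySem.List.sorted gt (fun x => x) false).Pairwise (· ≤ ·) := by
    simpa using PySem.List.sorted_pairwise gt (fun x => x)
  obtain ⟨hPW, hMem⟩ := fcfMerge_spec [] _ _ hpool hgts (by simp) (by simp)
  apply PySem.List.sorted_id_eq_of_perm_of_pairwise
  · apply (List.perm_ext_iff_of_nodup ?_ ?_).mpr
    · intro y
      rw [hMem y, mem_outer]
      simp only [PySem.List.mem_sorted, List.mem_flatMap, PySem.Set.mem_ofList,
        List.not_mem_nil, false_or]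
      tauto
    · exact hPW.nodup
    · exact nodup_outer _ mf _ List.nodup_nil
  · exact hPW.imp le_of_lt
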